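-- pv_equiv track=rewrite | github.com/jano31415/codejam | codeforces/129_round_edu/probc.py | solve
-- ===== SOURCE A (Python) =====
-- def solve(n,a,b):
--     if n == 1:
--         return 0, []
--     ab = list(zip(a,b))
--     abi = [(aibi[0],aibi[1],i) for i,aibi in enumerate(ab)]
--     abi.sort()
--     cura, curb, j = abi[0]
--     for i in range(len(ab)):
--         newa ,newb, _ = abi[i]
--         if newa < cura or newb < curb:
--             return -1, None
--         cura = newa
--         curb = newb
--     moves = []
--     end_start = [(end_index, abi[end_index][2]) for end_index in range(n)]
--     beginning = list(range(n))
--     for i in range(n):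
--         start_i = end_start[i][1]
--         cur_i = beginning.index(start_i)
--         if i != cur_i:
--             moves.append((str(i+1), str(cur_i+1)))
--             tmp = beginning[i]
--             beginning[i] = beginning[cur_i]
--             beginning[cur_i]=tmp
--     assert beginning == [x[1] for x in end_start]
--     return len(moves), moves
-- ===== SOURCE B (Python) =====
-- def solve(n, a, b):
--     if n == 1:
--         return 0, []
--     srt = sorted((ai, bi, i) for i, (ai, bi) in enumerate(zip(a, b)))
--     # valid iff the second components are nondecreasing after the sort
--     if any(srt[k][1] > srt[k + 1][1] for k in range(len(srt) - 1)):
--         return -1, None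
--     # Each target's current slot is found by chasing "moved-to" links: when a swap
--     # fixes slot i, the element displaced from slot i lands at dest[i] (> i), and an
--     # element sits still until the step of the slot it occupies.  Each element is
--     # targeted once, so the total number of hops over the whole loop is at most n.
--     dest = {}
--     moves = []
--     for i in range(n):
--         s = srt[i][2]
--         while s < i:
--             s = dest[s]
--         if s != i:
--             moves.append((str(i + 1), str(s + 1)))
--             dest[i] = s
--     return len(moves), moves
-- ===== Notes on version B (the rewrite author's own statement) =====
-- stated objective: faster
-- what changed: The placement loop keeps no array at all: instead of A's beginning list with a beginning.index linear scan and explicit element swaps, B records for each fixed slot i only the slot dest[i] its displaced occupant moved to, and finds each target's current slot by chasing these strictly increasing links (each element is targeted exactly once, so all chases together cost O(n) hops); the validity check becomes a single adjacent-pairs scan of the sorted second components instead of A's running-state loop.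
-- outside the precondition, e.g. on solve(2, [1, 2, 9], [1, 2, 9]): A returns (0, []), B returns (0, []); on solve(2, [9, 1, 2], [9, 1, 2]): A raises ValueError, B returns (2, [('1', '2'), ('2', '3')])
import Mathlib
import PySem

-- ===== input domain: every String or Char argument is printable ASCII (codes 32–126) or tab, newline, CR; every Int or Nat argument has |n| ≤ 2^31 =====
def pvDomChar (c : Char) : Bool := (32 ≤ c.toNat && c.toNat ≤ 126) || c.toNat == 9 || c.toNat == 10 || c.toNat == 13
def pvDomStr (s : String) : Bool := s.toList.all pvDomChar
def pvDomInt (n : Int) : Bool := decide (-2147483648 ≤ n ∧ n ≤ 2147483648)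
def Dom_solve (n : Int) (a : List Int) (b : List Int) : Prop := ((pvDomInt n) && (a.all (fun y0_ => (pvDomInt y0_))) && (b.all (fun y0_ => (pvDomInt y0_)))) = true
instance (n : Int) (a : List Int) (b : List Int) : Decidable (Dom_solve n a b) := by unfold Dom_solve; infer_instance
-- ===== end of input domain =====

-- B keeps no position array: when a swap fixes slot i it records only dest[i], the slot
-- the displaced occupant moved to, and finds each target by chasing these increasing links;
-- return values agree on Pre_.

-- Python's list.sort() / sorted() on (int,int,int) tuples: stable insertion sort
-- comparing tuples lexicographically (shared by both ports, as both Pythons call sorted()).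
def tripleLt (x y : Int × Int × Int) : Bool :=
  x.1 < y.1 || (x.1 == y.1 && (x.2.1 < y.2.1 || (x.2.1 == y.2.1 && x.2.2 < y.2.2)))

def sortT (l : List (Int × Int × Int)) : List (Int × Int × Int) :=
  l.foldl (fun acc x => PySem.List.insertBy tripleLt x acc) []

-- ===== PORT A =====
-- body of A's check loop: state (cura, curb, returned?); an early return latches the flag
def chkA (st : Int × Int × Bool) (t : Int × Int × Int) : Int × Int × Bool :=
  if st.2.2 then st else
  if t.1 < st.1 ∨ t.2.1 < st.2.1 then (st.1, st.2.1, true)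
  else (t.1, t.2.1, false)

-- body of A's placement loop: beginning.index scan, then the two assignments
def moveA (st : List Int × List (String × String)) (i start_i : Int) :
    List Int × List (String × String) :=
  -- beginning.index(start_i): ValueError (none) cannot happen on Pre_ inputs
  let cur_i : Int := (((PySem.List.index? st.1 start_i).getD 0 : Nat) : Int)
  if i ≠ cur_i then
    let tmp := PySem.List.pyGetD st.1 i 0
    ((st.1.set i.toNat (PySem.List.pyGetD st.1 cur_i 0)).set cur_i.toNat tmp,
     st.2 ++ [(PySem.Int.toStr (i + 1), PySem.Int.toStr (cur_i + 1))])
  else st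

def solve (n : Int) (a : List Int) (b : List Int) : Int × (Option (List (String × String))) :=
  if n == 1 then (0, some []) else
  let ab := a.zip b
  let abi := sortT ((PySem.List.enumerate ab).map (fun p => (p.2.1, p.2.2, p.1)))
  -- cura, curb, j = abi[0]  (IndexError on empty abi: excluded by Pre_)
  let c0 := PySem.List.pyGetD abi 0 (0, 0, 0)
  let chk := (PySem.List.pyRange 0 ((ab.length : Int)) 1).foldl
    (fun st i => chkA st (PySem.List.pyGetD abi i (0, 0, 0))) (c0.1, c0.2.1, false)
  if chk.2.2 then (-1, none) else
  let end_start := (PySem.List.pyRange 0 n 1).map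
    (fun ei => (ei, (PySem.List.pyGetD abi ei (0, 0, 0)).2.2))
  let fin := (PySem.List.pyRange 0 n 1).foldl
    (fun st i => moveA st i (PySem.List.pyGetD end_start i (0, 0)).2)
    (PySem.List.pyRange 0 n 1, [])
  -- the assert holds on Pre_ inputs (it raises nowhere Pre_ admits)
  ((fin.2.length : Int), some fin.2)

-- ===== PORT B =====
-- 'while s < i: s = dest[s]' of Source B, with fuel i.toNat + 1: the links strictly increase,
-- so at most i hops happen before s ≥ i (exact on Pre_ inputs, where every chased key is
-- present; a missing key keeps s, where Python would raise KeyError — outside Pre_)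
def chaseB (d : PySem.Dict Int Int) (i : Int) : Nat → Int → Int
  | 0, s => s
  | f + 1, s => if s < i then chaseB d i f (PySem.Dict.getD d s s) else s

-- body of B's placement loop: chase the moved-to links, then record the new link
def moveB (st : PySem.Dict Int Int × List (String × String)) (i t : Int) :
    PySem.Dict Int Int × List (String × String) :=
  let s := chaseB st.1 i (i.toNat + 1) t
  if s ≠ i then
    (PySem.Dict.insert st.1 i s,
     st.2 ++ [(PySem.Int.toStr (i + 1), PySem.Int.toStr (s + 1))])
  else st

def solve_alt (n : Int) (a : List Int) (b : List Int) : Int × (Option (List (String × String))) :=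
  if n == 1 then (0, some []) else
  let srt := sortT ((PySem.List.enumerate (a.zip b)).map (fun p => (p.2.1, p.2.2, p.1)))
  let bad := (PySem.List.pyRange 0 ((srt.length : Int) - 1) 1).any
    (fun k => decide ((PySem.List.pyGetD srt (k + 1) (0, 0, 0)).2.1 < (PySem.List.pyGetD srt k (0, 0, 0)).2.1))
  if bad then (-1, none) else
  let fin := (PySem.List.pyRange 0 n 1).foldl
    (fun st i => moveB st i (PySem.List.pyGetD srt i (0, 0, 0)).2.2)
    (PySem.Dict.empty, [])
  ((fin.2.length : Int), some fin.2)

-- ===== PRECONDITION & SPEC =====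
-- an inversion in the pair list zip(a, b): two pairs no sort can order (strictly larger
-- first component, strictly smaller second); exactly the inputs the programs reject
def HasInversion (a : List Int) (b : List Int) : Prop :=
  ∃ p ∈ a.zip b, ∃ q ∈ a.zip b, p.1 < q.1 ∧ q.2 < p.2

-- Pre_ excludes (besides n ≠ 1 with an empty pair list, where A raises IndexError) the
-- positive n that disagree with min(len(a), len(b)) on an inversion-free input: there A
-- variously raises IndexError/ValueError or, when every needed index happens to be small,
-- returns a value reflecting its accidental use of the untruncated pair list.
def Pre_solve (n : Int) (a : List Int) (b : List Int) : Prop :=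
  n = 1 ∨ (1 ≤ min a.length b.length ∧
    ((min a.length b.length : Int) = n ∨ HasInversion a b ∨ n ≤ 0))
instance (n : Int) (a : List Int) (b : List Int) : Decidable (Pre_solve n a b) := by
  unfold Pre_solve HasInversion; infer_instance
def pvWitness_solve : Int × List Int × List Int := (2, [3, 1], [4, 2])

def Spec_solve (n : Int) (a : List Int) (b : List Int) (out : Int × (Option (List (String × String)))) : Prop := out = solve_alt n a b
instance (n : Int) (a : List Int) (b : List Int) (out : Int × (Option (List (String × String)))) : Decidable (Spec_solve n a b out) := by unfold Spec_solve; infer_instance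

-- ===== CLAIM (what is proved, stated in full; the proofs are below) =====
def Claim_equal_solve : Prop := ∀ (n : Int) (a : List Int) (b : List Int), Dom_solve n a b → Pre_solve n a b → Spec_solve n a b (solve n a b)

-- ===== LEMMAS AND PROOFS =====

def lexKey (t : Int × Int × Int) : Lex (Int × Lex (Int × Int)) := toLex (t.1, toLex (t.2.1, t.2.2))

lemma tripleLt_eq (x y : Int × Int × Int) : tripleLt x y = decide (lexKey x < lexKey y) := by
  have h : (lexKey x < lexKey y) ↔ (x.1 < y.1 ∨ (x.1 = y.1 ∧ (x.2.1 < y.2.1 ∨ (x.2.1 = y.2.1 ∧ x.2.2 < y.2.2)))) := by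
    simp [lexKey, Prod.Lex.lt_iff]
  simp only [tripleLt, h]
  by_cases h1 : x.1 < y.1 <;> by_cases h2 : x.1 = y.1 <;>
    by_cases h3 : x.2.1 < y.2.1 <;> by_cases h4 : x.2.1 = y.2.1 <;>
      simp [h1, h2, h3, h4]

lemma sortT_eq (l : List (Int × Int × Int)) : sortT l = PySem.List.sorted l lexKey false := by
  rw [PySem.List.sorted_eq_foldl_insertBy]
  unfold sortT
  congr 1
  funext acc x
  congr 1
  funext a b
  exact tripleLt_eq a b

lemma length_sortT (l : List (Int × Int × Int)) : (sortT l).length = l.length := by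
  rw [sortT_eq]; exact ((PySem.List.sorted_perm l lexKey false).length_eq)

-- getD/set bookkeeping
lemma getD_set_self (l : List Int) (i : Nat) (v : Int) (h : i < l.length) :
    (l.set i v).getD i 0 = v := by
  simp [List.getD, h]

lemma getD_set_ne (l : List Int) (i j : Nat) (v : Int) (h : i ≠ j) :
    (l.set i v).getD j 0 = l.getD j 0 := by
  simp [List.getD, List.getElem?_set_ne h]

lemma getD_range_map (N : Nat) (j : Nat) (hj : j < N) :
    ((List.range N).map (fun (k : Nat) => (k : Int))).getD j 0 = (j : Int) := by
  have h : ((List.range N).map (fun (k : Nat) => (k : Int)))[j]? = some (j : Int) := by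
    simp [hj]
  rw [List.getD, h]; rfl

-- the chase relation of B's links: from slot s, following strictly increasing links that
-- only leave keys < i, one lands at m ≥ i
inductive Reach (d : PySem.Dict Int Int) (i : Int) : Int → Int → Prop
  | stop (s : Int) : i ≤ s → Reach d i s s
  | step (s u m : Int) : s < i → PySem.Dict.get? d s = some u → s < u →
      Reach d i u m → Reach d i s m

lemma chase_of_reach {d : PySem.Dict Int Int} {i s m : Int} (h : Reach d i s m) :
    ∀ fuel : Nat, i ≤ s + fuel → chaseB d i fuel s = m := by
  induction h with
  | stop s hs =>
    intro fuel _
    cases fuel with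
    | zero => rfl
    | succ f => simp [chaseB, not_lt.2 hs]
  | step s u m hsi hget hsu _ ih =>
    intro fuel hfuel
    cases fuel with
    | zero => omega
    | succ f =>
      have hd : PySem.Dict.getD d s s = u := PySem.Dict.getD_of_get?_eq_some d s hget
      simp only [chaseB, if_pos hsi, hd]
      exact ih f (by omega)

lemma reach_bound_mono {d : PySem.Dict Int Int} {i s m : Int} (h : Reach d i s m)
    (hm : i + 1 ≤ m) : Reach d (i + 1) s m := by
  induction h with
  | stop s hs => exact Reach.stop s (by omega)
  | step s u m hsi hget hsu _ ih =>
    exact Reach.step s u m (by omega) hget hsu (ih hm)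

lemma reach_insert_mono {d : PySem.Dict Int Int} {i s m : Int} (j : Int)
    (h : Reach d i s m) (hm : i + 1 ≤ m) : Reach (d.insert i j) (i + 1) s m := by
  induction h with
  | stop s hs => exact Reach.stop s (by omega)
  | step s u m hsi hget hsu _ ih =>
    refine Reach.step s u m (by omega) ?_ hsu (ih hm)
    rw [PySem.Dict.get?_insert_of_ne d j (show s ≠ i by omega)]
    exact hget

lemma reach_extend {d : PySem.Dict Int Int} {i s m : Int} (j : Int)
    (h : Reach d i s m) (hmi : m = i) (hij : i < j) :
    Reach (d.insert i j) (i + 1) s j := by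
  induction h with
  | stop s hs =>
    refine Reach.step s j j (by omega) ?_ (by omega) (Reach.stop j (by omega))
    rw [hmi]
    exact PySem.Dict.get?_insert_self d i j
  | step s u m hsi hget hsu _ ih =>
    refine Reach.step s u j (by omega) ?_ hsu (ih hmi)
    rw [PySem.Dict.get?_insert_of_ne d j (show s ≠ i by omega)]
    exact hget

-- the index transposition a swap performs
def tswap (i m k : Nat) : Nat := if k = m then i else if k = i then m else k

lemma tswap_lt {N i m k : Nat} (hi : i < N) (hm : m < N) (hk : k < N) : tswap i m k < N := by
  unfold tswap; split_ifs <;> omega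

lemma tswap_invol {i m : Nat} (hne : i ≠ m) (k : Nat) : tswap i m (tswap i m k) = k := by
  unfold tswap; split_ifs <;> omega

-- list.index on a duplicate-free list: the slot holding the value
lemma index?_of_inj {val : List Int} {N : Nat} (hlen : val.length = N)
    (hinj : ∀ k k', k < N → k' < N → val.getD k 0 = val.getD k' 0 → k = k')
    {m : Nat} (hm : m < N) {t : Int} (ht : val.getD m 0 = t) :
    PySem.List.index? val t = some m := by
  have hmlen : m < val.length := by omega
  have hgm : val[m] = t := by rw [← ht]; exact (List.getD_eq_getElem val 0 hmlen).symm
  rw [PySem.List.index?_eq_some_iff]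
  refine ⟨val.take m, val.drop (m + 1), ?_, ?_, ?_⟩
  · conv_lhs => rw [← List.take_append_drop m val]
    rw [← List.getElem_cons_drop (as := val) (i := m) (h := hmlen), hgm]
  · simp [List.length_take]; omega
  · intro hmem
    rw [List.mem_iff_getElem] at hmem
    obtain ⟨q, hq, hqe⟩ := hmem
    rw [List.length_take] at hq
    have hqm : q < m := by omega
    have hqlen : q < val.length := by omega
    rw [List.getElem_take] at hqe
    have hq' : val.getD q 0 = t := by rw [List.getD_eq_getElem val 0 hqlen]; exact hqe
    have : q = m := hinj q m (by omega) hm (by rw [hq', ht])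
    omega

-- A's placement loop (beginning.index + swap) versus B's (link chase + insert):
-- one induction over the remaining slots, carrying A's array-state facts and, for B,
-- reachability of every unplaced element's slot through the recorded links
lemma loop_agree (N : Nat) (order : List Int)
    (hol : order.length = N)
    (hoinj : ∀ k k', k < N → k' < N → order.getD k 0 = order.getD k' 0 → k = k')
    (hobnd : ∀ k, k < N → 0 ≤ order.getD k 0 ∧ order.getD k 0 < (N : Int)) :
    ∀ (cnt i : Nat), i + cnt = N →
    ∀ (val : List Int) (d : PySem.Dict Int Int) (mv : List (String × String)),
    val.length = N →
    (∀ k k', k < N → k' < N → val.getD k 0 = val.getD k' 0 → k = k') →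
    (∀ x, x ∈ order → ∃ m : Nat, m < N ∧ val.getD m 0 = x) →
    (∀ k, k < i → val.getD k 0 = order.getD k 0) →
    (∀ (t : Int) (m : Nat), m < N → val.getD m 0 = t → (i : Int) ≤ (m : Int) →
      Reach d (i : Int) t (m : Int)) →
    ((List.range' i cnt).foldl (fun st (k : Nat) => moveA st (k : Int) (order.getD k 0)) (val, mv)).2
      = ((List.range' i cnt).foldl (fun st (k : Nat) => moveB st (k : Int) (order.getD k 0)) (d, mv)).2 := by
  intro cnt
  induction cnt with
  | zero => intro i _ val d mv _ _ _ _ _; rfl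
  | succ c ih =>
    intro i hiN val d mv hvlen hvinj hvmem hpre hreach
    have hiltN : i < N := by omega
    rw [List.range'_succ]
    simp only [List.foldl_cons]
    set t := order.getD i 0 with htdef
    have htmem : t ∈ order := by
      rw [htdef, List.getD_eq_getElem order 0 (by omega)]
      exact List.getElem_mem _
    obtain ⟨m, hmN, hvm⟩ := hvmem t htmem
    have htbnd := hobnd i hiltN
    have him : i ≤ m := by
      by_contra hlt
      push Not at hlt
      have : val.getD m 0 = order.getD m 0 := hpre m hlt
      have : order.getD m 0 = order.getD i 0 := by rw [← this, hvm, htdef]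
      have := hoinj m i (by omega) hiltN this
      omega
    have hidx : PySem.List.index? val t = some m := index?_of_inj hvlen hvinj hmN hvm
    have hreach_t : Reach d (i : Int) t (m : Int) := hreach t m hmN hvm (by exact_mod_cast him)
    have hchase : chaseB d (i : Int) ((i : Int).toNat + 1) t = (m : Int) := by
      apply chase_of_reach hreach_t
      have : ((i : Int)).toNat = i := Int.toNat_natCast i
      omega
    -- unfold one step of each loop
    have hA : moveA (val, mv) (i : Int) t =
        (if i = m then (val, mv) else
          ((val.set i (val.getD m 0)).set m (val.getD i 0),
           mv ++ [(PySem.Int.toStr ((i : Int) + 1), PySem.Int.toStr ((m : Int) + 1))])) := by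
      unfold moveA
      simp only [hidx, Option.getD_some]
      by_cases he : i = m
      · rw [if_neg (show ¬((i : Int) ≠ ((m : Nat) : Int)) by omega), if_pos he]
      · rw [if_pos (show (i : Int) ≠ ((m : Nat) : Int) by omega), if_neg he]
        have h1 : PySem.List.pyGetD val (i : Int) 0 = val.getD i 0 := PySem.List.pyGetD_natCast val i 0
        have h2 : PySem.List.pyGetD val ((m : Nat) : Int) 0 = val.getD m 0 := PySem.List.pyGetD_natCast val m 0
        rw [h1, h2, Int.toNat_natCast, Int.toNat_natCast]
    have hB : moveB (d, mv) (i : Int) t =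
        (if i = m then (d, mv) else
          (d.insert (i : Int) (m : Int),
           mv ++ [(PySem.Int.toStr ((i : Int) + 1), PySem.Int.toStr ((m : Int) + 1))])) := by
      unfold moveB
      simp only [hchase]
      by_cases he : i = m
      · rw [if_neg (show ¬(((m : Nat) : Int) ≠ (i : Int)) by omega), if_pos he]
      · rw [if_pos (show ((m : Nat) : Int) ≠ (i : Int) by omega), if_neg he]
    by_cases he : i = m
    · -- already in place: neither side moves
      rw [hA, hB, if_pos he, if_pos he]
      apply ih (i + 1) (by omega) val d mv hvlen hvinj hvmem
      · intro k hk
        by_cases hki : k < i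
        · exact hpre k hki
        · have : k = i := by omega
          subst this
          subst he
          rw [hvm, htdef]
      · intro t' m' hm' hvm' him'
        have h0 := hreach t' m' hm' hvm' (by exact_mod_cast (by omega : i ≤ m'))
        have : ((i + 1 : Nat) : Int) = (i : Int) + 1 := by push_cast; ring
        rw [this]
        apply reach_bound_mono h0
        have : i + 1 ≤ m' := by omega
        omega
    · -- a swap happens; B records the link i ↦ m
      rw [hA, hB, if_neg he, if_neg he]
      have himlt : i < m := by omega
      set u := val.getD i 0 with hudef
      set val' := (val.set i (val.getD m 0)).set m u with hval'def
      have hval'len : val'.length = N := by simp [hval'def, hvlen]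
      have hget' : ∀ k, k < N → val'.getD k 0 = val.getD (tswap i m k) 0 := by
        intro k hk
        unfold tswap
        by_cases hkm : k = m
        · rw [if_pos hkm, hkm, hval'def]
          exact getD_set_self _ _ _ (by simp [hvlen]; omega)
        · rw [if_neg hkm]
          by_cases hki : k = i
          · rw [if_pos hki, hki, hval'def, getD_set_ne _ _ _ _ (by omega), hvm]
            exact getD_set_self _ _ _ (by omega)
          · rw [if_neg hki, hval'def, getD_set_ne _ _ _ _ (by omega),
              getD_set_ne _ _ _ _ (by omega)]
      have hvinj' : ∀ k k', k < N → k' < N → val'.getD k 0 = val'.getD k' 0 → k = k' := by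
        intro k k' hk hk' hkk
        rw [hget' k hk, hget' k' hk'] at hkk
        have := hvinj _ _ (tswap_lt hiltN hmN hk) (tswap_lt hiltN hmN hk') hkk
        have h1 := tswap_invol (i := i) (m := m) (by omega) k
        have h2 := tswap_invol (i := i) (m := m) (by omega) k'
        rw [← h1, ← h2, this]
      have hvmem' : ∀ x, x ∈ order → ∃ m' : Nat, m' < N ∧ val'.getD m' 0 = x := by
        intro x hx
        obtain ⟨m', hm'N, hvm'⟩ := hvmem x hx
        refine ⟨tswap i m m', tswap_lt hiltN hmN hm'N, ?_⟩
        rw [hget' _ (tswap_lt hiltN hmN hm'N), tswap_invol (by omega), hvm']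
      apply ih (i + 1) (by omega) val' (d.insert (i : Int) (m : Int)) _ hval'len hvinj' hvmem'
      · intro k hk
        by_cases hki : k < i
        · rw [hget' k (by omega)]
          have : tswap i m k = k := by unfold tswap; split_ifs <;> omega
          rw [this]
          exact hpre k hki
        · have hki' : k = i := by omega
          rw [hget' k (by omega)]
          have ht2 : tswap i m k = m := by unfold tswap; split_ifs <;> omega
          rw [ht2, hvm, htdef, hki']
      · intro t' m' hm' hvm' him'
        have hcast : ((i + 1 : Nat) : Int) = (i : Int) + 1 := by push_cast; ring
        rw [hcast]
        have hm'i : i + 1 ≤ m' := by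
          have : (i : Int) + 1 ≤ (m' : Int) := by
            rw [← hcast]; exact_mod_cast him'
          exact_mod_cast (by omega : (i : Int) + 1 ≤ (m' : Int) → i + 1 ≤ m') this
        rw [hget' m' hm'] at hvm'
        by_cases hm'm : m' = m
        · -- the displaced element u now sits at m
          have ht2 : tswap i m m' = i := by unfold tswap; split_ifs <;> omega
          rw [ht2] at hvm'
          have h0 : Reach d (i : Int) t' (i : Int) :=
            hreach t' i hiltN hvm' (le_refl _)
          rw [hm'm]
          exact reach_extend (m : Int) h0 rfl (by exact_mod_cast himlt)
        · have hm'i2 : m' ≠ i := by omega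
          have : tswap i m m' = m' := by unfold tswap; split_ifs <;> omega
          rw [this] at hvm'
          have h0 := hreach t' m' hm' hvm' (by exact_mod_cast (by omega : i ≤ m'))
          exact reach_insert_mono (m : Int) h0 (by exact_mod_cast hm'i)

-- A's check loop characterised
def violFrom (x y : Int) : List (Int × Int × Int) → Bool
  | [] => false
  | t :: l => (decide (t.1 < x) || decide (t.2.1 < y)) || violFrom t.1 t.2.1 l

lemma chkA_latch (l : List (Int × Int × Int)) (x y : Int) :
    l.foldl chkA (x, y, true) = (x, y, true) := by
  induction l with
  | nil => rfl
  | cons t l ih => simpa [chkA] using ih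

lemma chkA_flag (l : List (Int × Int × Int)) : ∀ (x y : Int),
    (l.foldl chkA (x, y, false)).2.2 = violFrom x y l := by
  induction l with
  | nil => intro x y; rfl
  | cons t l ih =>
    intro x y
    simp only [List.foldl_cons, violFrom]
    by_cases hv : t.1 < x ∨ t.2.1 < y
    · rw [show chkA (x, y, false) t = (x, y, true) from by simp [chkA, hv]]
      rw [chkA_latch]
      simp [hv]
    · rw [show chkA (x, y, false) t = (t.1, t.2.1, false) from by simp [chkA, hv]]
      rw [ih]
      push Not at hv
      simp [not_lt.2 hv.1, not_lt.2 hv.2]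

-- B's check characterised
def adjViol : List Int → Bool
  | [] => false
  | [_] => false
  | x :: y :: l => decide (y < x) || adjViol (y :: l)

lemma adjViol_iff (bs : List Int) :
    adjViol bs = true ↔ ∃ k : Nat, k + 1 < bs.length ∧ bs.getD (k + 1) 0 < bs.getD k 0 := by
  induction bs with
  | nil => simp [adjViol]
  | cons x l ih =>
    cases l with
    | nil => simp [adjViol]
    | cons y l =>
      rw [show adjViol (x :: y :: l) = (decide (y < x) || adjViol (y :: l)) from rfl]
      simp only [Bool.or_eq_true, decide_eq_true_eq, ih]
      constructor
      · rintro (h | ⟨k, hk, hlt⟩)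
        · exact ⟨0, by simp, by simpa [List.getD] using h⟩
        · exact ⟨k + 1, by simpa using hk, by simpa [List.getD] using hlt⟩
      · rintro ⟨k, hk, hlt⟩
        cases k with
        | zero => left; simpa [List.getD] using hlt
        | succ k => right; exact ⟨k, by simpa using hk, by simpa [List.getD] using hlt⟩

-- B's any-scan over the sorted triples equals adjViol of their second components
lemma any_adj (S : List (Int × Int × Int)) :
    ((PySem.List.pyRange 0 ((S.length : Int) - 1) 1).any
      (fun k => decide ((PySem.List.pyGetD S (k + 1) (0, 0, 0)).2.1 < (PySem.List.pyGetD S k (0, 0, 0)).2.1)))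
    = adjViol (S.map (fun t => t.2.1)) := by
  rw [Bool.eq_iff_iff]
  rw [List.any_eq_true, adjViol_iff]
  constructor
  · rintro ⟨i, hmem, hp⟩
    rw [PySem.List.mem_pyRange_one] at hmem
    refine ⟨i.toNat, by simp; omega, ?_⟩
    rw [show i = ((i.toNat : Nat) : Int) from by omega] at hp
    rw [show ((i.toNat : Nat) : Int) + 1 = (((i.toNat + 1 : Nat)) : Int) from by omega] at hp
    rw [PySem.List.pyGetD_natCast, PySem.List.pyGetD_natCast] at hp
    have hl1 : i.toNat + 1 < S.length := by omega
    have hl0 : i.toNat < S.length := by omega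
    rw [List.getD_eq_getElem _ 0 (by simpa using hl1), List.getD_eq_getElem _ 0 (by simpa using hl0)]
    simp only [List.getElem_map]
    rw [List.getD_eq_getElem _ _ hl1, List.getD_eq_getElem _ _ hl0] at hp
    exact of_decide_eq_true hp
  · rintro ⟨k, hk, hlt⟩
    rw [List.length_map] at hk
    refine ⟨(k : Int), ?_, ?_⟩
    · rw [PySem.List.mem_pyRange_one]; omega
    · rw [show ((k : Nat) : Int) + 1 = (((k + 1 : Nat)) : Int) from by omega]
      rw [PySem.List.pyGetD_natCast, PySem.List.pyGetD_natCast]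
      rw [List.getD_eq_getElem _ 0 (by simpa using hk),
          List.getD_eq_getElem _ 0 (by simpa using (by omega : k < S.length))] at hlt
      simp only [List.getElem_map] at hlt
      rw [List.getD_eq_getElem _ _ hk, List.getD_eq_getElem _ _ (by omega : k < S.length)]
      exact decide_eq_true hlt

lemma lexKey_le_fst {x y : Int × Int × Int} (h : lexKey x ≤ lexKey y) : x.1 ≤ y.1 := by
  rw [lexKey, lexKey, Prod.Lex.le_iff] at h
  rcases h with h | ⟨h, _⟩ <;> simp at h <;> omega

lemma viol_eq_adj (l : List (Int × Int × Int)) : ∀ h : Int × Int × Int,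
    List.IsChain (fun x y => lexKey x ≤ lexKey y) (h :: l) →
    violFrom h.1 h.2.1 l = adjViol ((h :: l).map (fun t => t.2.1)) := by
  induction l with
  | nil => intro h _; rfl
  | cons t l ih =>
    intro h hch
    rw [List.isChain_cons_cons] at hch
    obtain ⟨hht, hch⟩ := hch
    have h1 : ¬ t.1 < h.1 := by have := lexKey_le_fst hht; omega
    show ((decide (t.1 < h.1) || decide (t.2.1 < h.2.1)) || violFrom t.1 t.2.1 l) = _
    rw [decide_eq_false h1, Bool.false_or]
    rw [ih t hch]
    rfl

lemma violFrom_head (h : Int × Int × Int) (l : List (Int × Int × Int)) :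
    violFrom h.1 h.2.1 (h :: l) = violFrom h.1 h.2.1 l := by
  show ((decide (h.1 < h.1) || decide (h.2.1 < h.2.1)) || violFrom h.1 h.2.1 l) = _
  simp

lemma lexKey_le_snd {x y : Int × Int × Int} (h : lexKey x ≤ lexKey y) (he : x.1 = y.1) :
    x.2.1 ≤ y.2.1 := by
  rw [lexKey, lexKey, Prod.Lex.le_iff] at h
  rcases h with h | ⟨_, h2⟩
  · simp at h; omega
  · rw [Prod.Lex.le_iff] at h2
    rcases h2 with h2 | ⟨h2, _⟩ <;> simp at h2 ⊢ <;> omega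

lemma adjViol_false_chain (bs : List Int) : adjViol bs = false → List.IsChain (· ≤ ·) bs := by
  induction bs with
  | nil => intro _; simp
  | cons x l ih =>
    cases l with
    | nil => intro _; simp
    | cons y l =>
      intro h
      rw [show adjViol (x :: y :: l) = (decide (y < x) || adjViol (y :: l)) from rfl,
        Bool.or_eq_false_iff] at h
      rw [List.isChain_cons_cons]
      refine ⟨?_, ih h.2⟩
      have := h.1
      simp at this
      omega

lemma mem_pair_of_mem_Z (a b : List Int) (x : Int × Int × Int)
    (hx : x ∈ (PySem.List.enumerate (a.zip b)).map (fun p => (p.2.1, p.2.2, p.1))) :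
    (x.1, x.2.1) ∈ a.zip b := by
  rw [List.mem_map] at hx
  obtain ⟨pr, hpr, rfl⟩ := hx
  rw [PySem.List.mem_enumerate_iff] at hpr
  obtain ⟨k, hk, rfl⟩ := hpr
  exact List.getElem_mem hk

lemma pair_mem_Z (a b : List Int) (p : Int × Int) (hp : p ∈ a.zip b) :
    ∃ x ∈ (PySem.List.enumerate (a.zip b)).map (fun p => (p.2.1, p.2.2, p.1)),
      x.1 = p.1 ∧ x.2.1 = p.2 := by
  rw [List.mem_iff_getElem] at hp
  obtain ⟨k, hk, hke⟩ := hp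
  refine ⟨(p.1, p.2, (k : Int)), ?_, rfl, rfl⟩
  rw [List.mem_map]
  refine ⟨((k : Int), p), ?_, rfl⟩
  rw [PySem.List.mem_enumerate_iff]
  exact ⟨k, hk, by rw [hke]; simp⟩

lemma adj_iff_inv (a b : List Int) (S : List (Int × Int × Int))
    (hperm : S.Perm ((PySem.List.enumerate (a.zip b)).map (fun p => (p.2.1, p.2.2, p.1))))
    (hpw : S.Pairwise (fun x y => lexKey x ≤ lexKey y)) :
    adjViol (S.map (fun t => t.2.1)) = true ↔ HasInversion a b := by
  constructor
  · intro h
    rw [adjViol_iff] at h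
    obtain ⟨k, hk, hlt⟩ := h
    rw [List.length_map] at hk
    have hk1 : k < S.length := by omega
    have hk2 : k + 1 < S.length := hk
    rw [List.getD_eq_getElem _ 0 (by simpa using hk),
        List.getD_eq_getElem _ 0 (by simpa using hk1)] at hlt
    simp only [List.getElem_map] at hlt
    have hle : lexKey S[k] ≤ lexKey S[k + 1] :=
      List.pairwise_iff_getElem.mp hpw k (k + 1) hk1 hk2 (by omega)
    have hfst : S[k].1 < S[k + 1].1 := by
      rcases lt_or_eq_of_le (lexKey_le_fst hle) with h' | h'
      · exact h'
      · exact absurd (lexKey_le_snd hle h') (by omega)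
    refine ⟨(S[k].1, S[k].2.1), mem_pair_of_mem_Z a b _ (hperm.mem_iff.mp (List.getElem_mem hk1)),
            (S[k + 1].1, S[k + 1].2.1), mem_pair_of_mem_Z a b _ (hperm.mem_iff.mp (List.getElem_mem hk2)),
            hfst, hlt⟩
  · intro h
    obtain ⟨p, hp, q, hq, hpq1, hpq2⟩ := h
    obtain ⟨x, hxZ, hx1, hx2⟩ := pair_mem_Z a b p hp
    obtain ⟨y, hyZ, hy1, hy2⟩ := pair_mem_Z a b q hq
    have hxS : x ∈ S := hperm.mem_iff.mpr hxZ
    have hyS : y ∈ S := hperm.mem_iff.mpr hyZ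
    rw [List.mem_iff_getElem] at hxS hyS
    obtain ⟨u, hu, hue⟩ := hxS
    obtain ⟨v, hv, hve⟩ := hyS
    have huv : u < v := by
      rcases Nat.lt_trichotomy u v with h' | h' | h'
      · exact h'
      · exfalso
        subst h'
        have hxy : x = y := hue.symm.trans hve
        have h1 := congrArg Prod.fst hxy
        rw [hx1, hy1] at h1
        omega
      · exfalso
        have := lexKey_le_fst (List.pairwise_iff_getElem.mp hpw v u hv hu h')
        rw [hue, hve] at this
        omega
    by_contra hfalse
    have hchain := adjViol_false_chain _ (Bool.eq_false_iff.mpr hfalse)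
    have hple := List.pairwise_iff_getElem.mp hchain.pairwise u v
      (by simpa using hu) (by simpa using hv) huv
    simp only [List.getElem_map] at hple
    rw [hue, hve] at hple
    omega

-- shared setup for n ≠ 1: both ports compute the same sorted list and the same flag
lemma alt_one (a b : List Int) : solve_alt 1 a b = (0, some []) := by
  simp [solve_alt]

theorem main_gen (N : Nat) (a b : List Int) (hn1 : N ≠ 1)
    (hm1 : 1 ≤ N) (hmN : min a.length b.length = N) :
    solve (N : Int) a b = solve_alt (N : Int) a b := by
  have hbeq : ((N : Int) == 1) = false := by simp; omega
  simp only [solve, solve_alt, hbeq, Bool.false_eq_true, if_false]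
  set Z := (PySem.List.enumerate (a.zip b)).map
    (fun p : Int × (Int × Int) => (p.2.1, p.2.2, p.1)) with hZdef
  set S := sortT Z with hSdef
  have hlenZ : Z.length = N := by
    rw [hZdef]; simp [PySem.List.length_enumerate]; omega
  have hlenS : S.length = N := by rw [hSdef, length_sortT, hlenZ]
  have hperm : S.Perm Z := by rw [hSdef, sortT_eq]; exact PySem.List.sorted_perm _ _ _
  have hpw : S.Pairwise (fun x y => lexKey x ≤ lexKey y) := by
    rw [hSdef, sortT_eq]; exact PySem.List.sorted_pairwise _ _
  have hSne : S ≠ [] := by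
    intro he; rw [he] at hlenS; simp at hlenS; omega
  obtain ⟨s0, stail, hScons⟩ : ∃ s0 stail, S = s0 :: stail := by
    cases hg : S with
    | nil => exact absurd hg hSne
    | cons x t => exact ⟨x, t, rfl⟩
  have hc0 : PySem.List.pyGetD S 0 (0, 0, 0) = s0 := by
    rw [hScons, show (0 : Int) = ((0 : Nat) : Int) from rfl, PySem.List.pyGetD_natCast]
    rfl
  rw [hc0]
  have hablen : ((a.zip b).length : Int) = ((S.length : Nat) : Int) := by
    rw [hlenS]; simp; omega
  rw [hablen]
  rw [PySem.List.foldl_pyRange_zero_pyGetD' S (0, 0, 0) chkA (s0.1, s0.2.1, false)]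
  have hflagA : (List.foldl chkA (s0.1, s0.2.1, false) S).2.2 =
      adjViol (S.map (fun t => t.2.1)) := by
    rw [chkA_flag, hScons, violFrom_head]
    exact viol_eq_adj stail s0 (by rw [← hScons]; exact hpw.isChain)
  rw [hflagA, any_adj S]
  by_cases hbad : adjViol (S.map (fun t => t.2.1)) = true
  · rw [if_pos hbad, if_pos hbad]
  · rw [if_neg hbad, if_neg hbad]
    -- the placement loops: rewrite both to folds over range' with targets order.getD
    set order := S.map (fun t : Int × Int × Int => t.2.2) with horderdef
    have holen : order.length = N := by rw [horderdef]; simp [hlenS]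
    have hZmap : Z.map (fun t : Int × Int × Int => t.2.2) =
        PySem.List.pyRange 0 ((N : Nat) : Int) 1 := by
      rw [hZdef, List.map_map]
      rw [show ((fun (t : Int × Int × Int) => t.2.2) ∘ (fun (p : Int × (Int × Int)) => (p.2.1, p.2.2, p.1))) =
          (fun (p : Int × (Int × Int)) => p.1) from rfl]
      rw [PySem.List.map_fst_enumerate]
      congr 1
      simp; omega
    have hordperm : order.Perm (PySem.List.pyRange 0 ((N : Nat) : Int) 1) := by
      rw [horderdef, ← hZmap]; exact hperm.map _
    have hRnd : (PySem.List.pyRange 0 ((N : Nat) : Int) 1).Nodup := by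
      rw [PySem.List.pyRange_zero_natCast]
      exact (List.nodup_range).map (fun x y => by omega)
    have hond : order.Nodup := hordperm.nodup_iff.mpr hRnd
    have hoinj : ∀ k k', k < N → k' < N → order.getD k 0 = order.getD k' 0 → k = k' := by
      intro k k' hk hk' hkk
      rw [List.getD_eq_getElem _ 0 (by omega), List.getD_eq_getElem _ 0 (by omega)] at hkk
      exact (List.Nodup.getElem_inj_iff hond).mp hkk
    have hobnd : ∀ k, k < N → 0 ≤ order.getD k 0 ∧ order.getD k 0 < (N : Int) := by
      intro k hk
      have hmem : order.getD k 0 ∈ order := by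
        rw [List.getD_eq_getElem _ 0 (by omega)]
        exact List.getElem_mem _
      have := hordperm.mem_iff.mp hmem
      rw [PySem.List.mem_pyRange_one] at this
      exact this
    -- targets: end_start lookup (A) and direct srt lookup (B) both give order.getD
    have hog : ∀ i : Int, 0 ≤ i → i < (N : Int) →
        (PySem.List.pyGetD S i (0, 0, 0)).2.2 = PySem.List.pyGetD order i 0 := by
      intro i h0 hiN
      rw [horderdef]
      rw [PySem.List.pyGetD_eq_getElem (List.map (fun t : Int × Int × Int => t.2.2) S) 0 h0
        (by simp only [List.length_map, hlenS]; omega)]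
      rw [PySem.List.pyGetD_eq_getElem S (0, 0, 0) h0 (by rw [hlenS]; omega)]
      simp only [List.getElem_map]
    have hlenmap : (List.map (fun ei => (ei, (PySem.List.pyGetD S ei (0, 0, 0)).2.2))
        (PySem.List.pyRange 0 ((N : Nat) : Int) 1)).length = N := by
      simp [PySem.List.pyRange_zero_natCast]
    have hRget : ∀ (i : Int), 0 ≤ i → i < (N : Int) →
        ∀ (h : i.toNat < (PySem.List.pyRange 0 ((N : Nat) : Int) 1).length),
        (PySem.List.pyRange 0 ((N : Nat) : Int) 1)[i.toNat] = i := by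
      intro i h0 hiN h
      simp only [PySem.List.pyRange_zero_natCast, List.getElem_map, List.getElem_range]
      omega
    have hes : ∀ i : Int, 0 ≤ i → i < (N : Int) →
        (PySem.List.pyGetD (List.map (fun ei => (ei, (PySem.List.pyGetD S ei (0, 0, 0)).2.2))
          (PySem.List.pyRange 0 ((N : Nat) : Int) 1)) i (0, 0)).2 = PySem.List.pyGetD order i 0 := by
      intro i h0 hiN
      rw [PySem.List.pyGetD_eq_getElem _ _ h0 (by rw [hlenmap]; omega)]
      simp only [List.getElem_map]
      rw [hRget i h0 hiN]
      exact hog i h0 hiN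
    rw [PySem.List.foldl_congr_mem (PySem.List.pyRange 0 ((N : Nat) : Int) 1) _
        (fun st i => moveA st i (PySem.List.pyGetD order i 0))
        (PySem.List.pyRange 0 ((N : Nat) : Int) 1, ([] : List (String × String)))
        (by intro acc x hx
            rw [PySem.List.mem_pyRange_one] at hx
            rw [hes x hx.1 hx.2])]
    rw [PySem.List.foldl_congr_mem (PySem.List.pyRange 0 ((N : Nat) : Int) 1) _
        (fun st i => moveB st i (PySem.List.pyGetD order i 0))
        ((PySem.Dict.empty : PySem.Dict Int Int), ([] : List (String × String)))
        (by intro acc x hx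
            rw [PySem.List.mem_pyRange_one] at hx
            rw [hog x hx.1 hx.2])]
    -- convert the pyRange folds to folds over List.range' 0 N
    have hRr : PySem.List.pyRange 0 ((N : Nat) : Int) 1 =
        (List.range' 0 N).map (fun k : Nat => (k : Int)) := by
      rw [PySem.List.pyRange_zero_natCast, List.range_eq_range']
    have hvinit : ∀ k k', k < N → k' < N →
        (PySem.List.pyRange 0 ((N : Nat) : Int) 1).getD k 0 =
        (PySem.List.pyRange 0 ((N : Nat) : Int) 1).getD k' 0 → k = k' := by
      intro k k' hk hk' hkk
      rw [PySem.List.pyRange_zero_natCast, getD_range_map N k hk, getD_range_map N k' hk'] at hkk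
      exact_mod_cast hkk
    have hvmem : ∀ x, x ∈ order → ∃ m : Nat, m < N ∧
        (PySem.List.pyRange 0 ((N : Nat) : Int) 1).getD m 0 = x := by
      intro x hx
      have := hordperm.mem_iff.mp hx
      rw [PySem.List.mem_pyRange_one] at this
      refine ⟨x.toNat, by omega, ?_⟩
      rw [PySem.List.pyRange_zero_natCast, getD_range_map N x.toNat (by omega)]
      omega
    have hreach0 : ∀ (t : Int) (m : Nat), m < N →
        (PySem.List.pyRange 0 ((N : Nat) : Int) 1).getD m 0 = t → ((0 : Nat) : Int) ≤ (m : Int) →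
        Reach PySem.Dict.empty ((0 : Nat) : Int) t (m : Int) := by
      intro t m hm hvm _
      rw [PySem.List.pyRange_zero_natCast, getD_range_map N m hm] at hvm
      rw [← hvm]
      exact Reach.stop _ (by positivity)
    have hloop := loop_agree N order holen hoinj hobnd N 0 (by omega)
      (PySem.List.pyRange 0 ((N : Nat) : Int) 1) PySem.Dict.empty []
      (by rw [PySem.List.pyRange_zero_natCast]; simp)
      hvinit hvmem (by intro k hk; omega) hreach0
    rw [hRr, List.foldl_map, List.foldl_map]
    have hbodyA : (fun (st : List Int × List (String × String)) (k : Nat) =>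
        moveA st (k : Int) (PySem.List.pyGetD order (k : Int) 0)) =
        (fun st (k : Nat) => moveA st (k : Int) (order.getD k 0)) := by
      funext st k
      rw [PySem.List.pyGetD_natCast]
    have hbodyB : (fun (st : PySem.Dict Int Int × List (String × String)) (k : Nat) =>
        moveB st (k : Int) (PySem.List.pyGetD order (k : Int) 0)) =
        (fun st (k : Nat) => moveB st (k : Int) (order.getD k 0)) := by
      funext st k
      rw [PySem.List.pyGetD_natCast]
    rw [hbodyA, hbodyB, ← hRr, hloop]

theorem main_inv (n : Int) (a b : List Int) (hn1 : n ≠ 1)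
    (hm1 : 1 ≤ min a.length b.length) (hinv : HasInversion a b) :
    solve n a b = solve_alt n a b := by
  have hbeq : (n == 1) = false := by simp; omega
  simp only [solve, solve_alt, hbeq, Bool.false_eq_true, if_false]
  set Z := (PySem.List.enumerate (a.zip b)).map
    (fun p : Int × (Int × Int) => (p.2.1, p.2.2, p.1)) with hZdef
  set S := sortT Z with hSdef
  have hlenS : S.length = min a.length b.length := by
    rw [hSdef, length_sortT, hZdef]
    simp [PySem.List.length_enumerate]
  have hperm : S.Perm Z := by rw [hSdef, sortT_eq]; exact PySem.List.sorted_perm _ _ _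
  have hpw : S.Pairwise (fun x y => lexKey x ≤ lexKey y) := by
    rw [hSdef, sortT_eq]; exact PySem.List.sorted_pairwise _ _
  have hSne : S ≠ [] := by
    intro he; rw [he] at hlenS; simp at hlenS; omega
  obtain ⟨s0, stail, hScons⟩ : ∃ s0 stail, S = s0 :: stail := by
    cases hg : S with
    | nil => exact absurd hg hSne
    | cons x t => exact ⟨x, t, rfl⟩
  have hc0 : PySem.List.pyGetD S 0 (0, 0, 0) = s0 := by
    rw [hScons, show (0 : Int) = ((0 : Nat) : Int) from rfl, PySem.List.pyGetD_natCast]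
    rfl
  rw [hc0]
  have hablen : ((a.zip b).length : Int) = ((S.length : Nat) : Int) := by
    rw [hlenS]; simp
  rw [hablen]
  rw [PySem.List.foldl_pyRange_zero_pyGetD' S (0, 0, 0) chkA (s0.1, s0.2.1, false)]
  have hflagA : (List.foldl chkA (s0.1, s0.2.1, false) S).2.2 =
      adjViol (S.map (fun t => t.2.1)) := by
    rw [chkA_flag, hScons, violFrom_head]
    exact viol_eq_adj stail s0 (by rw [← hScons]; exact hpw.isChain)
  rw [hflagA, any_adj S]
  have hbad : adjViol (S.map (fun t => t.2.1)) = true :=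
    (adj_iff_inv a b S (by rw [hZdef] at hperm; exact hperm) hpw).mpr hinv
  rw [if_pos hbad, if_pos hbad]

theorem main_nonpos (n : Int) (a b : List Int) (hn : n ≤ 0)
    (hm1 : 1 ≤ min a.length b.length) (hnoinv : ¬ HasInversion a b) :
    solve n a b = solve_alt n a b := by
  have hbeq : (n == 1) = false := by simp; omega
  have hr0 : PySem.List.pyRange 0 n 1 = [] := PySem.List.pyRange_one_eq_nil hn
  simp only [solve, solve_alt, hbeq, Bool.false_eq_true, if_false, hr0]
  set Z := (PySem.List.enumerate (a.zip b)).map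
    (fun p : Int × (Int × Int) => (p.2.1, p.2.2, p.1)) with hZdef
  set S := sortT Z with hSdef
  have hlenS : S.length = min a.length b.length := by
    rw [hSdef, length_sortT, hZdef]
    simp [PySem.List.length_enumerate]
  have hperm : S.Perm Z := by rw [hSdef, sortT_eq]; exact PySem.List.sorted_perm _ _ _
  have hpw : S.Pairwise (fun x y => lexKey x ≤ lexKey y) := by
    rw [hSdef, sortT_eq]; exact PySem.List.sorted_pairwise _ _
  have hSne : S ≠ [] := by
    intro he; rw [he] at hlenS; simp at hlenS; omega
  obtain ⟨s0, stail, hScons⟩ : ∃ s0 stail, S = s0 :: stail := by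
    cases hg : S with
    | nil => exact absurd hg hSne
    | cons x t => exact ⟨x, t, rfl⟩
  have hc0 : PySem.List.pyGetD S 0 (0, 0, 0) = s0 := by
    rw [hScons, show (0 : Int) = ((0 : Nat) : Int) from rfl, PySem.List.pyGetD_natCast]
    rfl
  rw [hc0]
  have hablen : ((a.zip b).length : Int) = ((S.length : Nat) : Int) := by
    rw [hlenS]; simp
  rw [hablen]
  rw [PySem.List.foldl_pyRange_zero_pyGetD' S (0, 0, 0) chkA (s0.1, s0.2.1, false)]
  have hflagA : (List.foldl chkA (s0.1, s0.2.1, false) S).2.2 =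
      adjViol (S.map (fun t => t.2.1)) := by
    rw [chkA_flag, hScons, violFrom_head]
    exact viol_eq_adj stail s0 (by rw [← hScons]; exact hpw.isChain)
  rw [hflagA, any_adj S]
  have hbad : adjViol (S.map (fun t => t.2.1)) = false := by
    rw [← Bool.not_eq_true, adj_iff_inv a b S (by rw [hZdef] at hperm; exact hperm) hpw]
    exact hnoinv
  rw [hbad]
  simp

-- ===== VERDICT (by name: the statement is the Claim_ definition above) =====
theorem solve_spec : Claim_equal_solve := by
  intro n a b _ hpre
  unfold Spec_solve
  by_cases hn1 : n = 1
  · subst hn1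
    rw [alt_one]
    simp [solve]
  · rcases hpre with h1 | ⟨hm1, hmn | hinv | hle⟩
    · exact absurd h1 hn1
    · obtain ⟨N, rfl⟩ : ∃ N : Nat, n = (N : Int) := ⟨n.toNat, by omega⟩
      exact main_gen N a b (by intro h; exact hn1 (by rw [h]; rfl)) (by omega) (by omega)
    · exact main_inv n a b hn1 hm1 hinv
    · by_cases hinv : HasInversion a b
      · exact main_inv n a b hn1 hm1 hinv
      · exact main_nonpos n a b hle hm1 hinv
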